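-- pv_equiv track=rewrite | github.com/x24yang0104/Algorithm_Data_Structure | BFS + Union Find/Zombie in Matrix.py | zombie
-- ===== SOURCE A (Python) =====
-- from typing import List
--
-- def zombie(grid: List[List[int]]) -> int:
--     # write your code here
--     if not grid or not grid[0]:
--         return -1
--
--     queue = []
--     m, n = len(grid), len(grid[0])
--     people_count, day_count = 0, 0
--     dx, dy = [1, 0, -1, 0], [0, 1, 0, -1]
--
--     for i in range(m):
--         for j in range(n):
--             if grid[i][j] == 0:
--                 people_count += 1
--             elif grid[i][j] == 1:
--                 queue.append((i, j))
--
--     if people_count == 0: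
--         return 0
--
--     def inbound(x, y):
--         return 0 <= x < m and 0 <= y < n
--
--     while queue:
--         day_count += 1
--         size = len(queue)
--         for k in range(size):
--             x, y = queue[k]
--             for i in range(len(dx)):
--                 curr_dx, curr_dy = x + dx[i], y + dy[i]
--                 if inbound(curr_dx, curr_dy) and grid[curr_dx][curr_dy] == 0:
--                     grid[curr_dx][curr_dy] = 1
--                     queue.append((curr_dx, curr_dy))
--                     people_count -= 1
--                     if people_count == 0:
--                         return day_count
--         queue = queue[size:]
--     return -1
-- ===== SOURCE B (Python) =====
-- from typing import List
--
-- def zombie(grid: List[List[int]]) -> int: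
--     # Cellular-automaton simulation: no queue. Each day, every still-healthy cell
--     # checks ("pull") whether some neighbour is already a zombie; if so it turns.
--     # Works on a private copy of the grid (does NOT mutate the argument, unlike A;
--     # the equivalence is about the return value).
--     if not grid or not grid[0]:
--         return -1
--     m, n = len(grid), len(grid[0])
--     state = [[grid[i][j] for j in range(n)] for i in range(m)]
--     remaining = sum(row.count(0) for row in state)
--     if remaining == 0:
--         return 0
--     day = 0
--     while True:
--         day += 1
--         newly = [(i, j) for i in range(m) for j in range(n)
--                  if state[i][j] == 0 and any(
--                      0 <= i + di < m and 0 <= j + dj < n and state[i + di][j + dj] == 1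
--                      for di, dj in ((1, 0), (0, 1), (-1, 0), (0, -1)))]
--         if not newly:
--             return -1
--         for i, j in newly:
--             state[i][j] = 1
--         remaining -= len(newly)
--         if remaining == 0:
--             return day
-- ===== Notes on version B (the rewrite author's own statement) =====
-- stated objective: alternative
-- what changed: Replaces the queue-driven multi-source BFS (frontier cells push infection to neighbours, queue snapshot per day) by a queueless cellular-automaton simulation: each day every still-healthy cell of a full-grid sweep pulls from its neighbours (turns iff some neighbour is already a zombie); B works on a private copy and does not mutate the argument grid, unlike A; equivalence is about the return value.
import Mathlib
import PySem

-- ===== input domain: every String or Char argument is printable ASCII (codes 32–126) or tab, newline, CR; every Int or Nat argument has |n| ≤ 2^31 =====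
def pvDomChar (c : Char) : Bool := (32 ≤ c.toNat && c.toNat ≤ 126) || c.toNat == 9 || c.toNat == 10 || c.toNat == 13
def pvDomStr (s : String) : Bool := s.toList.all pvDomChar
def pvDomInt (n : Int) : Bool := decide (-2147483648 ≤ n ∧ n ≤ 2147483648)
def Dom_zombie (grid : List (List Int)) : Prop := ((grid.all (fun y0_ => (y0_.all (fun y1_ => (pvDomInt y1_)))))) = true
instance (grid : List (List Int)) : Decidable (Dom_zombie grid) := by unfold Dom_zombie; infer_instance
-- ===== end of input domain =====

-- B replaces A's queue-driven BFS by a queueless cellular-automaton sweep: each day every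
-- still-healthy cell checks ("pulls") whether a neighbour is already a zombie. B works on a
-- private copy and does NOT mutate the argument grid, unlike A; the equivalence proved here
-- is about the RETURN value.

-- shared grid primitives (both Pythons read/write grid[x][y] after the same bounds check)
def pvGget (g : List (List Int)) (x y : Int) : Int := (g.getD x.toNat []).getD y.toNat 0
def pvGset (g : List (List Int)) (x y v : Int) : List (List Int) :=
  g.set x.toNat ((g.getD x.toNat []).set y.toNat v)
def pvInb (m n x y : Int) : Bool := (0 ≤ x && x < m) && (0 ≤ y && y < n)
-- the four neighbour offsets: A's paired dx,dy lists and B's tuple literal are this same list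
def pvDirs : List (Int × Int) := [(1, 0), (0, 1), (-1, 0), (0, -1)]
-- number of 0-cells over whole rows: fuel bound for both loops (totality guard only)
def pvZeros (g : List (List Int)) : Nat := (g.map (fun r => r.count 0)).sum

-- ===== PORT A =====

-- inner 'for i in range(len(dx))' of one queue cell; none = the 'return day_count' early exit
def zombieStepA (m n x y : Int) :
    List (Int × Int) → List (List Int) → List (Int × Int) → Int →
    Option (List (List Int) × List (Int × Int) × Int)
  | [], g, q, p => some (g, q, p)
  | (dx, dy) :: ds, g, q, p =>
    let nx := x + dx
    let ny := y + dy
    if pvInb m n nx ny && (pvGget g nx ny == 0) then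
      let g' := pvGset g nx ny 1
      let q' := q ++ [(nx, ny)]
      let p' := p - 1
      if p' == 0 then none else zombieStepA m n x y ds g' q' p'
    else zombieStepA m n x y ds g q p

-- 'for k in range(size)' over the level snapshot; q accumulates the appended cells
def zombieLevelA (m n : Int) :
    List (Int × Int) → List (List Int) → List (Int × Int) → Int →
    Option (List (List Int) × List (Int × Int) × Int)
  | [], g, q, p => some (g, q, p)
  | (x, y) :: cs, g, q, p =>
    match zombieStepA m n x y pvDirs g q p with
    | none => none
    | some (g', q', p') => zombieLevelA m n cs g' q' p'

-- 'while queue:' with day_count; fuel is a totality guard only (each level pops ≥ 1 cell)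
def zombieRunA (m n : Int) :
    Nat → List (List Int) → List (Int × Int) → Int → Int → Int
  | 0, _, _, _, _ => -1
  | fuel + 1, g, q, p, day =>
    if q = [] then -1
    else
      match zombieLevelA m n q g [] p with
      | none => day + 1
      | some (g', q', p') => zombieRunA m n fuel g' q' p' (day + 1)

def zombie (grid : List (List Int)) : Int :=
  if grid = [] then -1
  else if grid.headD [] = [] then -1
  else
    let m : Int := grid.length
    let n : Int := (grid.headD []).length
    -- 'for i in range(m): for j in range(n): …' counting people and seeding the queue
    let s :=
      (PySem.List.pyRange 0 m 1).foldl
        (fun (s : Int × List (Int × Int)) i =>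
          (PySem.List.pyRange 0 n 1).foldl
            (fun (s : Int × List (Int × Int)) j =>
              if pvGget grid i j == 0 then (s.1 + 1, s.2)
              else if pvGget grid i j == 1 then (s.1, s.2 ++ [(i, j)])
              else s)
            s)
        ((0 : Int), ([] : List (Int × Int)))
    if s.1 == 0 then 0
    else zombieRunA m n (pvZeros grid + 2) grid s.2 s.1 0

-- ===== PORT B =====

-- the day's comprehension: every window cell that is 0 and has a neighbour equal to 1
def zombieNewB (m n : Int) (g : List (List Int)) : List (Int × Int) :=
  (PySem.List.pyRange 0 m 1).flatMap (fun i =>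
    (PySem.List.pyRange 0 n 1).filterMap (fun j =>
      if pvGget g i j == 0 &&
          pvDirs.any (fun d => pvInb m n (i + d.1) (j + d.2) && (pvGget g (i + d.1) (j + d.2) == 1))
      then some (i, j) else none))

-- 'for i, j in newly: state[i][j] = 1'
def zombieApplyB (g : List (List Int)) (cs : List (Int × Int)) : List (List Int) :=
  cs.foldl (fun g c => pvGset g c.1 c.2 1) g

-- 'while True:' of Source B; fuel is a totality guard only (each kept round infects ≥ 1 cell)
def zombieRunB (m n : Int) : Nat → List (List Int) → Int → Int → Int
  | 0, _, _, _ => -1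
  | fuel + 1, g, rem, day =>
    let N := zombieNewB m n g
    if N = [] then -1
    else
      let g' := zombieApplyB g N
      let rem' := rem - N.length
      if rem' == 0 then day + 1 else zombieRunB m n fuel g' rem' (day + 1)

def zombie_alt (grid : List (List Int)) : Int :=
  if grid = [] then -1
  else if grid.headD [] = [] then -1
  else
    let m : Int := grid.length
    let n : Int := (grid.headD []).length
    -- state = [[grid[i][j] for j in range(n)] for i in range(m)]
    let st := (PySem.List.pyRange 0 m 1).map (fun i =>
      (PySem.List.pyRange 0 n 1).map (fun j => pvGget grid i j))
    -- remaining = sum(row.count(0) for row in state)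
    let rem : Int := (st.map (fun r => (r.count 0 : Int))).sum
    if rem == 0 then 0
    else zombieRunB m n (pvZeros st + 2) st rem 0

-- ===== PRECONDITION & SPEC =====
-- Pre_ excludes exactly the grids on which A raises IndexError: a row shorter than the
-- first row (the seeding scan reads grid[i][j] for every j < len(grid[0])).
def Pre_zombie (grid : List (List Int)) : Prop :=
  ∀ r ∈ grid, (grid.headD []).length ≤ r.length
instance (grid : List (List Int)) : Decidable (Pre_zombie grid) := by
  unfold Pre_zombie; infer_instance
def pvWitness_zombie : List (List Int) := [[1, 0, 0], [2, 0, 1]]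

def Spec_zombie (grid : List (List Int)) (out : Int) : Prop := out = zombie_alt grid
instance (grid : List (List Int)) (out : Int) : Decidable (Spec_zombie grid out) := by
  unfold Spec_zombie; infer_instance

-- ===== CLAIM (what is proved, stated in full; the proofs are below) =====
def Claim_equal_zombie : Prop :=
  ∀ (grid : List (List Int)), Dom_zombie grid → Pre_zombie grid → Spec_zombie grid (zombie grid)

-- ===== LEMMAS AND PROOFS =====

-- the window cells in row-major order
def pvCells (m n : Int) : List (Int × Int) :=
  (PySem.List.pyRange 0 m 1).flatMap (fun i => (PySem.List.pyRange 0 n 1).map (fun j => (i, j)))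

def pvAdjOnes (m n : Int) (g : List (List Int)) (c : Int × Int) : Bool :=
  pvDirs.any (fun d => pvInb m n (c.1 + d.1) (c.2 + d.2) && (pvGget g (c.1 + d.1) (c.2 + d.2) == 1))

def pvAdjQ (Q : List (Int × Int)) (c : Int × Int) : Bool :=
  Q.any (fun q => pvDirs.any (fun d => q.1 + d.1 == c.1 && q.2 + d.2 == c.2))

def pvZerosW (m n : Int) (g : List (List Int)) : Nat :=
  (pvCells m n).countP (fun c => pvGget g c.1 c.2 == 0)

-- grid shape invariant: m rows, every row at least n wide
def pvShape (m n : Int) (g : List (List Int)) : Prop :=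
  (g.length : Int) = m ∧ ∀ r ∈ g, n ≤ (r.length : Int)

-- the two grids agree on the window
def pvWinEq (m n : Int) (g1 g2 : List (List Int)) : Prop :=
  ∀ a b : Int, pvInb m n a b = true → pvGget g1 a b = pvGget g2 a b

-- round invariant: queue cells are in-window zombies, and every healthy cell
-- with a zombie neighbour has a queue-cell neighbour
def pvInvQ (m n : Int) (g : List (List Int)) (Q : List (Int × Int)) : Prop :=
  (∀ c ∈ Q, pvInb m n c.1 c.2 = true ∧ pvGget g c.1 c.2 = 1) ∧
  (∀ c : Int × Int, pvInb m n c.1 c.2 = true → pvGget g c.1 c.2 = 0 →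
    pvAdjOnes m n g c = true → pvAdjQ Q c = true)

-- cells infected by one queue cell, in direction order (mirrors zombieStepA's grid threading)
def pvTstep (m n x y : Int) : List (Int × Int) → List (List Int) → List (Int × Int)
  | [], _ => []
  | (dx, dy) :: ds, g =>
    let nx := x + dx
    let ny := y + dy
    if pvInb m n nx ny && (pvGget g nx ny == 0) then
      (nx, ny) :: pvTstep m n x y ds (pvGset g nx ny 1)
    else pvTstep m n x y ds g


theorem getD_set_self {α : Type} (l : List α) (i : Nat) (v d : α) (h : i < l.length) :
    (l.set i v).getD i d = v := by
  rw [List.getD_eq_getElem _ _ (by simpa using h)]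
  exact List.getElem_set_self _

theorem getD_set_ne {α : Type} (l : List α) (i j : Nat) (v : α) (d : α) (h : i ≠ j) :
    (l.set i v).getD j d = l.getD j d := by
  by_cases hj : j < l.length
  · rw [List.getD_eq_getElem _ _ (by simpa using hj), List.getD_eq_getElem _ _ hj]
    exact List.getElem_set_ne h _
  · rw [List.getD_eq_default _ _ (by simpa using hj), List.getD_eq_default _ _ (by omega)]

theorem mem_pvCells (m n : Int) (c : Int × Int) :
    c ∈ pvCells m n ↔ pvInb m n c.1 c.2 = true := by
  obtain ⟨a, b⟩ := c
  simp only [pvCells, List.mem_flatMap, List.mem_map, PySem.List.mem_pyRange_one, pvInb,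
    Prod.mk.injEq, Bool.and_eq_true, decide_eq_true_eq]
  constructor
  · rintro ⟨i, hi, j, hj, rfl, rfl⟩; exact ⟨⟨hi.1, hi.2⟩, hj.1, hj.2⟩
  · rintro ⟨⟨h1, h2⟩, h3, h4⟩; exact ⟨a, ⟨h1, h2⟩, b, ⟨h3, h4⟩, rfl, rfl⟩

theorem nodup_pvCells (m n : Int) : (pvCells m n).Nodup := by
  unfold pvCells
  rw [List.nodup_flatMap]
  constructor
  · intro i _
    exact (PySem.List.nodup_pyRange_one 0 n).map (fun a b h => by
      simpa using congrArg Prod.snd h)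
  · refine (PySem.List.nodup_pyRange_one 0 m).imp ?_
    intro i j hij c hc1 hc2
    simp only [List.mem_map] at hc1 hc2
    obtain ⟨b1, _, h1⟩ := hc1; obtain ⟨b2, _, h2⟩ := hc2
    exact hij (congrArg Prod.fst (h1.trans h2.symm))

theorem pvGget_gset_ne (g : List (List Int)) (x y a b v : Int)
    (hx : 0 ≤ x) (hy : 0 ≤ y) (ha : 0 ≤ a) (hb : 0 ≤ b) (hne : (a, b) ≠ (x, y)) :
    pvGget (pvGset g x y v) a b = pvGget g a b := by
  simp only [ne_eq, Prod.mk.injEq, not_and_or] at hne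
  unfold pvGget pvGset
  by_cases hax : a = x
  · have hby : b.toNat ≠ y.toNat := by
      rcases hne with h | h
      · exact absurd hax h
      · omega
    subst hax
    by_cases hlt : a.toNat < g.length
    · rw [getD_set_self _ _ _ _ hlt, getD_set_ne _ _ _ _ _ (by omega)]
    · rw [List.set_eq_of_length_le (by omega)]
  · rw [getD_set_ne _ _ _ _ _ (by omega)]

theorem pvGget_gset_self (m n : Int) (g : List (List Int)) (x y : Int)
    (hs : pvShape m n g) (hin : pvInb m n x y = true) :
    pvGget (pvGset g x y 1) x y = 1 := by
  simp only [pvInb, Bool.and_eq_true, decide_eq_true_eq] at hin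
  have hm := hs.1
  have hx : x.toNat < g.length := by omega
  have hrow : g.getD x.toNat [] = g[x.toNat] := List.getD_eq_getElem g [] hx
  have hn : n ≤ (g[x.toNat].length : Int) := hs.2 _ (List.getElem_mem hx)
  have hy : y.toNat < (g.getD x.toNat []).length := by rw [hrow]; omega
  unfold pvGget pvGset
  rw [getD_set_self _ _ _ _ hx, getD_set_self _ _ _ _ hy]

theorem pvShape_gset (m n : Int) (g : List (List Int)) (x y v : Int) (h : pvShape m n g) :
    pvShape m n (pvGset g x y v) := by
  by_cases hx : x.toNat < g.length
  · refine ⟨by simpa [pvGset] using h.1, ?_⟩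
    intro r hr
    rcases List.mem_or_eq_of_mem_set hr with hr | hr
    · exact h.2 r hr
    · subst hr
      have : (g.getD x.toNat []) = g[x.toNat] := List.getD_eq_getElem g [] hx
      rw [List.length_set, this]
      exact h.2 _ (List.getElem_mem hx)
  · rw [pvGset, List.set_eq_of_length_le (by omega)]
    exact h

theorem pvApplyB_facts (m n : Int) (l : List (Int × Int)) :
    ∀ g : List (List Int), (∀ c ∈ l, pvInb m n c.1 c.2 = true) → pvShape m n g →
      pvShape m n (zombieApplyB g l) ∧
      ∀ a b : Int, pvInb m n a b = true →
        pvGget (zombieApplyB g l) a b = if (a, b) ∈ l then 1 else pvGget g a b := by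
  induction l with
  | nil => intro g _ hs; exact ⟨hs, by simp [zombieApplyB]⟩
  | cons c l ih =>
    intro g hin hs
    obtain ⟨x, y⟩ := c
    have hxy := hin (x, y) (by simp)
    have happ : zombieApplyB g ((x, y) :: l) = zombieApplyB (pvGset g x y 1) l := rfl
    have hs' := pvShape_gset m n g x y 1 hs
    have hl : ∀ c ∈ l, pvInb m n c.1 c.2 = true := fun c hc => hin c (by simp [hc])
    obtain ⟨hsh, hget⟩ := ih (pvGset g x y 1) hl hs'
    rw [happ]
    refine ⟨hsh, ?_⟩
    intro a b hab
    rw [hget a b hab]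
    by_cases hmem : (a, b) ∈ l
    · simp [hmem]
    · by_cases heq : (a, b) = (x, y)
      · rw [if_neg hmem, if_pos (by simp [heq]), show a = x from congrArg Prod.fst heq,
          show b = y from congrArg Prod.snd heq]
        exact pvGget_gset_self m n g x y hs hxy
      · rw [if_neg hmem, if_neg (by
          simp only [List.mem_cons]
          rintro (h | h)
          · exact heq h
          · exact hmem h)]
        have hab' := hab
        simp only [pvInb, Bool.and_eq_true, decide_eq_true_eq] at hab' hxy
        exact pvGget_gset_ne g x y a b 1 (by omega) (by omega) (by omega) (by omega) heq


theorem dirs_nodup : pvDirs.Nodup := by decide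

theorem dirs_pairwise (x y : Int) :
    pvDirs.Pairwise (fun d d' => (x + d.1, y + d.2) ≠ (x + d'.1, y + d'.2)) := by
  simp [pvDirs, List.pairwise_cons, Prod.mk.injEq]

theorem pvTstep_eq (m n x y : Int) : ∀ (ds : List (Int × Int)) (g : List (List Int)),
    ds.Pairwise (fun d d' => (x + d.1, y + d.2) ≠ (x + d'.1, y + d'.2)) →
    pvTstep m n x y ds g = ds.filterMap (fun d =>
      if pvInb m n (x + d.1) (y + d.2) && (pvGget g (x + d.1) (y + d.2) == 0)
      then some (x + d.1, y + d.2) else none) := by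
  intro ds
  induction ds with
  | nil => intro g _; rfl
  | cons d ds ih =>
    intro g hpw
    obtain ⟨dx, dy⟩ := d
    rw [List.pairwise_cons] at hpw
    by_cases hc : (pvInb m n (x + dx) (y + dy) && (pvGget g (x + dx) (y + dy) == 0)) = true
    · have hinb : pvInb m n (x + dx) (y + dy) = true := by
        simp only [Bool.and_eq_true] at hc; exact hc.1
      have hT : pvTstep m n x y ((dx, dy) :: ds) g =
          (x + dx, y + dy) :: pvTstep m n x y ds (pvGset g (x + dx) (y + dy) 1) := by
        simp only [pvTstep]; rw [if_pos hc]
      rw [hT, ih _ hpw.2, List.filterMap_cons_some (by rw [if_pos hc])]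
      congr 1
      apply List.filterMap_congr
      intro d' hd'
      by_cases hin' : pvInb m n (x + d'.1) (y + d'.2) = true
      · have h1 := hpw.1 d' hd'
        simp only [pvInb, Bool.and_eq_true, decide_eq_true_eq] at hinb hin'
        rw [pvGget_gset_ne g (x + dx) (y + dy) (x + d'.1) (y + d'.2) 1
          (by omega) (by omega) (by omega) (by omega) (hpw.1 d' hd').symm]
      · simp only [Bool.not_eq_true] at hin'
        rw [hin']
        simp
    · simp only [Bool.not_eq_true] at hc
      have hT : pvTstep m n x y ((dx, dy) :: ds) g = pvTstep m n x y ds g := by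
        simp only [pvTstep]; rw [if_neg (by simp [hc])]
      rw [hT, List.filterMap_cons_none (by rw [if_neg (by simp [hc])])]
      exact ih _ hpw.2

theorem stepA_char (m n x y : Int) : ∀ (ds : List (Int × Int)) (g : List (List Int))
    (acc : List (Int × Int)) (p : Int),
    zombieStepA m n x y ds g acc p =
      if 1 ≤ p ∧ p ≤ ((pvTstep m n x y ds g).length : Int) then none
      else some (zombieApplyB g (pvTstep m n x y ds g), acc ++ pvTstep m n x y ds g,
        p - (pvTstep m n x y ds g).length) := by
  intro ds
  induction ds with
  | nil =>
    intro g acc p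
    simp only [zombieStepA, pvTstep, List.length_nil, Nat.cast_zero]
    rw [if_neg (by omega)]
    simp [zombieApplyB]
  | cons d ds ih =>
    intro g acc p
    obtain ⟨dx, dy⟩ := d
    by_cases hc : (pvInb m n (x + dx) (y + dy) && (pvGget g (x + dx) (y + dy) == 0)) = true
    · have hT : pvTstep m n x y ((dx, dy) :: ds) g =
          (x + dx, y + dy) :: pvTstep m n x y ds (pvGset g (x + dx) (y + dy) 1) := by
        simp only [pvTstep]; rw [if_pos hc]
      have hS : zombieStepA m n x y ((dx, dy) :: ds) g acc p =
          if (p - 1 == 0) = true then none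
          else zombieStepA m n x y ds (pvGset g (x + dx) (y + dy) 1)
            (acc ++ [(x + dx, y + dy)]) (p - 1) := by
        simp only [zombieStepA]; rw [if_pos hc]
      rw [hS, hT]
      by_cases hp : p - 1 = 0
      · rw [if_pos (by simpa using hp), if_pos ⟨by omega, by
          simp only [List.length_cons]; push_cast; omega⟩]
      · rw [if_neg (by simpa using hp), ih]
        by_cases hcond : 1 ≤ p - 1 ∧
            p - 1 ≤ ((pvTstep m n x y ds (pvGset g (x + dx) (y + dy) 1)).length : Int)
        · rw [if_pos hcond, if_pos (by
            simp only [List.length_cons]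
            omega)]
        · rw [if_neg hcond, if_neg (by
            simp only [List.length_cons]
            omega)]
          simp only [Option.some.injEq, Prod.mk.injEq]
          refine ⟨rfl, by simp, ?_⟩
          simp only [List.length_cons]
          push_cast
          ring
    · have hT : pvTstep m n x y ((dx, dy) :: ds) g = pvTstep m n x y ds g := by
        simp only [pvTstep]; rw [if_neg (by simp [hc])]
      have hS : zombieStepA m n x y ((dx, dy) :: ds) g acc p =
          zombieStepA m n x y ds g acc p := by
        simp only [zombieStepA]; rw [if_neg (by simp [hc])]
      rw [hS, hT]
      exact ih g acc p

theorem filter_partition_perm {α : Type} (z q r : α → Bool) : ∀ l : List α,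
    (l.filter fun a => z a && (q a || r a)).Perm
      ((l.filter fun a => z a && q a) ++ l.filter fun a => z a && (!q a && r a)) := by
  intro l
  induction l with
  | nil => simp
  | cons a l ih =>
    by_cases hz : z a = true
    · by_cases hq : q a = true
      · simpa [List.filter_cons, hz, hq] using ih.cons a
      · by_cases hr : r a = true
        · simp only [List.filter_cons, hz, hq, hr]
          simp only [Bool.not_eq_true] at hq
          exact (ih.cons a).trans List.perm_middle.symm
        · simp only [Bool.not_eq_true] at hq hr
          simpa [List.filter_cons, hz, hq, hr] using ih
    · simp only [Bool.not_eq_true] at hz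
      simpa [List.filter_cons, hz] using ih

theorem Tstep_mem (m n x y : Int) (g : List (List Int)) (c : Int × Int) :
    c ∈ pvTstep m n x y pvDirs g ↔
      (pvInb m n c.1 c.2 = true ∧ pvGget g c.1 c.2 = 0 ∧ pvAdjQ [(x, y)] c = true) := by
  rw [pvTstep_eq m n x y pvDirs g (dirs_pairwise x y)]
  simp only [List.mem_filterMap, pvAdjQ, List.any_cons, List.any_nil, Bool.or_false,
    List.any_eq_true, Bool.and_eq_true, beq_iff_eq]
  constructor
  · rintro ⟨d, hd, h⟩
    split at h
    · rename_i hcond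
      injection h with h'
      subst h'
      exact ⟨hcond.1, hcond.2, ⟨d, hd, rfl, rfl⟩⟩
      
    · exact absurd h (by simp)
  · rintro ⟨hinb, hz, d, hd, h1, h2⟩
    refine ⟨d, hd, ?_⟩
    rw [if_pos (by rw [h1, h2]; simp [hinb, hz]), h1, h2]

theorem Tstep_nodup (m n x y : Int) (g : List (List Int)) :
    (pvTstep m n x y pvDirs g).Nodup := by
  rw [pvTstep_eq m n x y pvDirs g (dirs_pairwise x y)]
  apply List.Nodup.filterMap ?_ dirs_nodup
  intro a a' b hb hb'
  split at hb
  · split at hb'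
    · injection hb with h; injection hb' with h'
      have h1 := congrArg Prod.fst (h.trans h'.symm)
      have h2 := congrArg Prod.snd (h.trans h'.symm)
      simp only at h1 h2
      obtain ⟨a1, a2⟩ := a; obtain ⟨a1', a2'⟩ := a'
      simp only at h1 h2
      simp only [Prod.mk.injEq]
      omega
    · exact absurd hb' (by simp)
  · exact absurd hb (by simp)

theorem Tstep_perm (m n x y : Int) (g : List (List Int)) :
    (pvTstep m n x y pvDirs g).Perm
      ((pvCells m n).filter (fun c => (pvGget g c.1 c.2 == 0) && pvAdjQ [(x, y)] c)) := by
  apply List.perm_of_nodup_nodup_toFinset_eq (Tstep_nodup m n x y g)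
    ((nodup_pvCells m n).filter _)
  ext c
  simp only [List.mem_toFinset, List.mem_filter, mem_pvCells, Tstep_mem,
    Bool.and_eq_true, beq_iff_eq]


-- the set of cells a round infects, as a canonical row-major list
def pvNewOf (m n : Int) (g : List (List Int)) (cs : List (Int × Int)) : List (Int × Int) :=
  (pvCells m n).filter (fun c => (pvGget g c.1 c.2 == 0) && pvAdjQ cs c)

theorem adjQ_cons (x y : Int) (cs : List (Int × Int)) (c : Int × Int) :
    pvAdjQ ((x, y) :: cs) c = (pvAdjQ [(x, y)] c || pvAdjQ cs c) := by
  simp [pvAdjQ]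

theorem level_char (m n : Int) : ∀ (cs : List (Int × Int)) (g : List (List Int))
    (acc : List (Int × Int)) (p : Int), pvShape m n g →
    ∃ l, l.Perm (pvNewOf m n g cs) ∧ (∀ c ∈ l, pvInb m n c.1 c.2 = true) ∧
      zombieLevelA m n cs g acc p =
        (if 1 ≤ p ∧ p ≤ ((pvNewOf m n g cs).length : Int) then none
         else some (zombieApplyB g l, acc ++ l, p - (pvNewOf m n g cs).length)) := by
  intro cs
  induction cs with
  | nil =>
    intro g acc p _
    have hS : pvNewOf m n g [] = [] := by
      simp [pvNewOf, pvAdjQ]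
    refine ⟨[], by rw [hS], by simp, ?_⟩
    rw [hS]
    simp only [List.length_nil, Nat.cast_zero]
    rw [if_neg (by omega)]
    simp [zombieLevelA, zombieApplyB]
  | cons hd cs ih =>
    intro g acc p hs
    obtain ⟨x, y⟩ := hd
    have hTmem : ∀ c ∈ pvTstep m n x y pvDirs g, pvInb m n c.1 c.2 = true :=
      fun c hc => ((Tstep_mem m n x y g c).mp hc).1
    have hTperm := Tstep_perm m n x y g
    have hpart := filter_partition_perm (fun c : Int × Int => pvGget g c.1 c.2 == 0)
      (fun c => pvAdjQ [(x, y)] c) (fun c => pvAdjQ cs c) (pvCells m n)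
    have hSperm : (pvNewOf m n g ((x, y) :: cs)).Perm
        (((pvCells m n).filter fun c => (pvGget g c.1 c.2 == 0) && pvAdjQ [(x, y)] c) ++
          ((pvCells m n).filter fun c =>
            (pvGget g c.1 c.2 == 0) && (!pvAdjQ [(x, y)] c && pvAdjQ cs c))) := by
      have : pvNewOf m n g ((x, y) :: cs) =
          (pvCells m n).filter fun c =>
            (pvGget g c.1 c.2 == 0) && (pvAdjQ [(x, y)] c || pvAdjQ cs c) := by
        unfold pvNewOf
        exact List.filter_congr (fun c _ => by rw [adjQ_cons])
      rw [this]
      exact hpart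
    have hlevel : zombieLevelA m n ((x, y) :: cs) g acc p =
        match zombieStepA m n x y pvDirs g acc p with
        | none => none
        | some (g', q', p') => zombieLevelA m n cs g' q' p' := rfl
    rw [hlevel, stepA_char]
    have hlenT := hTperm.length_eq
    have hlenS := hSperm.length_eq
    rw [List.length_append] at hlenS
    by_cases hc1 : 1 ≤ p ∧ p ≤ ((pvTstep m n x y pvDirs g).length : Int)
    · refine ⟨pvNewOf m n g ((x, y) :: cs), List.Perm.refl _, ?_, ?_⟩
      · intro c hc
        exact ((mem_pvCells m n c).mp (List.mem_of_mem_filter hc))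
      · rw [if_pos hc1, if_pos ⟨hc1.1, by omega⟩]
    · rw [if_neg hc1]
      have hshape1 : pvShape m n (zombieApplyB g (pvTstep m n x y pvDirs g)) :=
        (pvApplyB_facts m n _ g hTmem hs).1
      obtain ⟨l1, hl1perm, hl1mem, hl1⟩ := ih (zombieApplyB g (pvTstep m n x y pvDirs g))
        (acc ++ pvTstep m n x y pvDirs g) (p - (pvTstep m n x y pvDirs g).length) hshape1
      have hS1eq : pvNewOf m n (zombieApplyB g (pvTstep m n x y pvDirs g)) cs =
          (pvCells m n).filter fun c =>
            (pvGget g c.1 c.2 == 0) && (!pvAdjQ [(x, y)] c && pvAdjQ cs c) := by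
        unfold pvNewOf
        apply List.filter_congr
        intro c hcell
        have hinb := (mem_pvCells m n c).mp hcell
        rw [(pvApplyB_facts m n _ g hTmem hs).2 c.1 c.2 hinb]
        by_cases hmem : (c.1, c.2) ∈ pvTstep m n x y pvDirs g
        · have hq := (Tstep_mem m n x y g (c.1, c.2)).mp hmem
          rw [if_pos hmem]
          simp [hq.2.1, hq.2.2]
        · rw [if_neg hmem]
          by_cases hz : pvGget g c.1 c.2 = 0
          · have hq : pvAdjQ [(x, y)] c = false := by
              by_contra hq
              exact hmem ((Tstep_mem m n x y g (c.1, c.2)).mpr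
                ⟨hinb, hz, by simpa using Bool.not_eq_false _ ▸ hq⟩)
            simp [hz, hq]
          · have hzf : (pvGget g c.1 c.2 == 0) = false := by simpa using hz
            rw [hzf]
            simp
      rw [hS1eq] at hl1perm hl1
      refine ⟨pvTstep m n x y pvDirs g ++ l1, ?_, ?_, ?_⟩
      · exact (hTperm.append hl1perm).trans hSperm.symm
      · intro c hc
        rcases List.mem_append.mp hc with h | h
        · exact hTmem c h
        · exact hl1mem c h
      · dsimp only
        rw [hl1]
        have hlen1 := hl1perm.length_eq
        by_cases hc2 : 1 ≤ p - ((pvTstep m n x y pvDirs g).length : Int) ∧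
            p - ((pvTstep m n x y pvDirs g).length : Int) ≤
              (((pvCells m n).filter fun c =>
                (pvGget g c.1 c.2 == 0) && (!pvAdjQ [(x, y)] c && pvAdjQ cs c)).length : Int)
        · rw [if_pos hc2, if_pos (by omega)]
        · rw [if_neg hc2, if_neg (by omega)]
          simp only [Option.some.injEq, Prod.mk.injEq]
          refine ⟨?_, by simp, ?_⟩
          · unfold zombieApplyB
            rw [List.foldl_append]
          · omega


theorem filterMap_if_map {α β : Type} (l : List α) (f : α → β) (P : β → Bool) :
    l.filterMap (fun a => if P (f a) = true then some (f a) else none) = (l.map f).filter P := by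
  induction l with
  | nil => rfl
  | cons a l ih =>
    by_cases h : P (f a) = true
    · rw [List.filterMap_cons_some (by rw [if_pos h]), ih, List.map_cons,
        List.filter_cons, if_pos h]
    · simp only [Bool.not_eq_true] at h
      rw [List.filterMap_cons_none (by rw [if_neg (by simp [h])]), ih, List.map_cons,
        List.filter_cons, if_neg (by simp [h])]

theorem filter_flatMap' {α β : Type} (l : List α) (f : α → List β) (p : β → Bool) :
    l.flatMap (fun a => (f a).filter p) = (l.flatMap f).filter p := by
  induction l with
  | nil => rfl
  | cons a l ih => simp [List.flatMap_cons, List.filter_append, ih]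

theorem newB_eq (m n : Int) (g : List (List Int)) :
    zombieNewB m n g =
      (pvCells m n).filter (fun c => (pvGget g c.1 c.2 == 0) && pvAdjOnes m n g c) := by
  unfold zombieNewB pvCells
  rw [← filter_flatMap']
  apply List.flatMap_congr
  intro i _
  exact filterMap_if_map (PySem.List.pyRange 0 n 1) (fun j => (i, j))
    (fun c => (pvGget g c.1 c.2 == 0) && pvAdjOnes m n g c)

theorem countP_and_split {α : Type} (l : List α) (p q : α → Bool) :
    l.countP (fun a => p a && q a) + l.countP (fun a => p a && !q a) = l.countP p := by
  induction l with
  | nil => rfl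
  | cons a l ih =>
    by_cases hp : p a = true
    · by_cases hq : q a = true
      · simp only [List.countP_cons, hp, hq]
        simp
        omega
      · simp only [Bool.not_eq_true] at hq
        simp only [List.countP_cons, hp, hq]
        simp
        omega
    · simp only [Bool.not_eq_true] at hp
      simp only [List.countP_cons, hp]
      simp
      omega

theorem countP_mem_filter {α : Type} [DecidableEq α] (l : List α) (condP : α → Bool) :
    l.countP (fun a => decide (a ∈ l.filter condP)) = (l.filter condP).length := by
  rw [← List.countP_eq_length_filter]
  apply List.countP_congr
  intro a ha
  simp [List.mem_filter, ha]

theorem zerosW_apply (m n : Int) (g : List (List Int)) (cond : Int × Int → Bool)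
    (hs : pvShape m n g) (himp : ∀ c, cond c = true → (pvGget g c.1 c.2 == 0) = true) :
    pvZerosW m n (zombieApplyB g ((pvCells m n).filter cond)) +
      ((pvCells m n).filter cond).length = pvZerosW m n g := by
  have hmem : ∀ c ∈ (pvCells m n).filter cond, pvInb m n c.1 c.2 = true :=
    fun c hc => (mem_pvCells m n c).mp (List.mem_of_mem_filter hc)
  have hget := (pvApplyB_facts m n _ g hmem hs).2
  have h1 : pvZerosW m n (zombieApplyB g ((pvCells m n).filter cond)) =
      (pvCells m n).countP (fun c =>
        (pvGget g c.1 c.2 == 0) && !decide (c ∈ (pvCells m n).filter cond)) := by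
    apply List.countP_congr
    intro c hc
    have hinb := (mem_pvCells m n c).mp hc
    rw [hget c.1 c.2 hinb]
    by_cases hm : (c.1, c.2) ∈ (pvCells m n).filter cond
    · rw [if_pos hm]
      simp [hm]
    · rw [if_neg hm]
      simp [hm]
  have h2 : (pvCells m n).countP (fun c =>
      (pvGget g c.1 c.2 == 0) && decide (c ∈ (pvCells m n).filter cond)) =
      ((pvCells m n).filter cond).length := by
    rw [← countP_mem_filter (pvCells m n) cond]
    apply List.countP_congr
    intro c hc
    constructor
    · rintro h
      simp only [Bool.and_eq_true, decide_eq_true_eq] at h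
      simp [h.2]
    · intro h
      simp only [decide_eq_true_eq] at h
      have := himp c ((List.mem_filter.mp h).2)
      simp [this, h]
  have h3 := countP_and_split (pvCells m n)
    (fun c => (pvGget g c.1 c.2 == 0)) (fun c => decide (c ∈ (pvCells m n).filter cond))
  simp only [] at h3
  unfold pvZerosW at h1 ⊢
  omega

theorem neg_mem_dirs (d : Int × Int) (hd : d ∈ pvDirs) : (-d.1, -d.2) ∈ pvDirs := by
  obtain ⟨d1, d2⟩ := d
  simp only [pvDirs, List.mem_cons, List.not_mem_nil, or_false, Prod.mk.injEq] at hd ⊢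
  rcases hd with ⟨rfl, rfl⟩ | ⟨rfl, rfl⟩ | ⟨rfl, rfl⟩ | ⟨rfl, rfl⟩ <;> norm_num

theorem run_sim (m n : Int) : ∀ (k : Nat) (gA gB : List (List Int)) (Q : List (Int × Int))
    (p day : Int) (fa fb : Nat),
    pvShape m n gA → pvShape m n gB → pvWinEq m n gA gB → pvInvQ m n gB Q →
    pvZerosW m n gB = k → p = (k : Int) → 1 ≤ p → k + 2 ≤ fa → k + 2 ≤ fb →
    zombieRunA m n fa gA Q p day = zombieRunB m n fb gB p day := by
  intro k
  induction k using Nat.strong_induction_on with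
  | _ k ihk =>
  intro gA gB Q p day fa fb hsA hsB hw hinv hzero hp hp1 hfa hfb
  obtain ⟨fa', rfl⟩ : ∃ fa', fa = fa' + 1 := ⟨fa - 1, by omega⟩
  obtain ⟨fb', rfl⟩ : ∃ fb', fb = fb' + 1 := ⟨fb - 1, by omega⟩
  -- B's sweep list equals the canonical list of A's round, read off gA
  have hNAB : pvNewOf m n gA Q = zombieNewB m n gB := by
    rw [newB_eq]
    unfold pvNewOf
    apply List.filter_congr
    intro c hc
    have hinb := (mem_pvCells m n c).mp hc
    rw [hw c.1 c.2 hinb]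
    by_cases hz : pvGget gB c.1 c.2 = 0
    · have hzt : (pvGget gB c.1 c.2 == 0) = true := by simp [hz]
      rw [hzt, Bool.true_and, Bool.true_and]
      -- adjQ Q c = adjOnes gB c on healthy in-window cells
      by_cases ha : pvAdjQ Q c = true
      · rw [ha]
        unfold pvAdjQ at ha
        simp only [List.any_eq_true, Bool.and_eq_true, beq_iff_eq] at ha
        obtain ⟨q, hq, d, hd, h1, h2⟩ := ha
        have hq1 := hinv.1 q hq
        symm
        unfold pvAdjOnes
        rw [List.any_eq_true]
        refine ⟨(-d.1, -d.2), neg_mem_dirs d hd, ?_⟩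
        have he1 : c.1 + -d.1 = q.1 := by omega
        have he2 : c.2 + -d.2 = q.2 := by omega
        rw [he1, he2, hq1.1, hq1.2]
        simp
      · have ha' : pvAdjQ Q c = false := by simpa using ha
        rw [ha']
        by_cases hb : pvAdjOnes m n gB c = true
        · exact absurd (hinv.2 c hinb hz hb) (by simp [ha'])
        · simp [Bool.not_eq_true] at hb
          rw [hb]
    · have hzf : (pvGget gB c.1 c.2 == 0) = false := by simpa using hz
      rw [hzf, Bool.false_and, Bool.false_and]
  by_cases hQ : Q = []
  · subst hQ
    have hN : zombieNewB m n gB = [] := by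
      rw [← hNAB]
      simp [pvNewOf, pvAdjQ]
    simp only [zombieRunA, zombieRunB, hN]
    simp
  · have hA : zombieRunA m n (fa' + 1) gA Q p day =
        match zombieLevelA m n Q gA [] p with
        | none => day + 1
        | some (g', q', p') => zombieRunA m n fa' g' q' p' (day + 1) := by
      simp only [zombieRunA, if_neg hQ]
    obtain ⟨l, hlperm, hlmem, hlev⟩ := level_char m n Q gA [] p hsA
    have hlenN : (pvNewOf m n gA Q).length = (zombieNewB m n gB).length := by rw [hNAB]
    have hNk : (zombieNewB m n gB).length ≤ k := by
      rw [newB_eq]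
      have := countP_and_split (pvCells m n)
        (fun c => (pvGget gB c.1 c.2 == 0)) (fun c => pvAdjOnes m n gB c)
      have h4 : (pvCells m n).countP
          (fun c => (pvGget gB c.1 c.2 == 0) && pvAdjOnes m n gB c) =
          ((pvCells m n).filter
            (fun c => (pvGget gB c.1 c.2 == 0) && pvAdjOnes m n gB c)).length :=
        List.countP_eq_length_filter
      unfold pvZerosW at hzero
      omega
    by_cases hN : zombieNewB m n gB = []
    · have hS : pvNewOf m n gA Q = [] := by rw [hNAB, hN]
      have hl : l = [] := List.perm_nil.mp (hS ▸ hlperm)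
      rw [hA, hlev, hS, hl]
      simp only [List.length_nil, Nat.cast_zero]
      rw [if_neg (by omega)]
      obtain ⟨fa'', rfl⟩ : ∃ fa'', fa' = fa'' + 1 := ⟨fa' - 1, by omega⟩
      simp only [zombieRunB, zombieRunA, hN, zombieApplyB, List.foldl_nil,
        List.nil_append]
      norm_num
    · have hNlen1 : 1 ≤ (zombieNewB m n gB).length := by
        cases hne : zombieNewB m n gB with
        | nil => exact absurd hne hN
        | cons a l' => simp
      have hB : zombieRunB m n (fb' + 1) gB p day =
          if (p - (zombieNewB m n gB).length == 0) = true then day + 1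
          else zombieRunB m n fb' (zombieApplyB gB (zombieNewB m n gB))
            (p - (zombieNewB m n gB).length) (day + 1) := by
        simp only [zombieRunB, if_neg hN]
      rw [hA, hlev, hB]
      by_cases hpN : p - ((zombieNewB m n gB).length : Int) = 0
      · rw [if_pos ⟨hp1, by omega⟩, if_pos (by simpa using hpN)]
      · rw [if_neg (by omega), if_neg (by simpa using hpN)]
        -- recurse
        have hNmem : ∀ c ∈ zombieNewB m n gB, pvInb m n c.1 c.2 = true := by
          intro c hc
          rw [newB_eq] at hc
          exact (mem_pvCells m n c).mp (List.mem_of_mem_filter hc)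
        have hmemiff : ∀ c : Int × Int, (c ∈ l ↔ c ∈ zombieNewB m n gB) := by
          intro c
          rw [hlperm.mem_iff, hNAB]
        have hsA' : pvShape m n (zombieApplyB gA l) := (pvApplyB_facts m n l gA hlmem hsA).1
        have hsB' : pvShape m n (zombieApplyB gB (zombieNewB m n gB)) :=
          (pvApplyB_facts m n _ gB hNmem hsB).1
        have hgetA := (pvApplyB_facts m n l gA hlmem hsA).2
        have hgetB := (pvApplyB_facts m n _ gB hNmem hsB).2
        have hw' : pvWinEq m n (zombieApplyB gA l) (zombieApplyB gB (zombieNewB m n gB)) := by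
          intro a b hab
          rw [hgetA a b hab, hgetB a b hab, hw a b hab]
          by_cases hm : (a, b) ∈ l
          · rw [if_pos hm, if_pos ((hmemiff (a, b)).mp hm)]
          · rw [if_neg hm, if_neg (fun hx => hm ((hmemiff (a, b)).mpr hx))]
        have hNzero : ∀ c ∈ zombieNewB m n gB, pvGget gB c.1 c.2 = 0 := by
          intro c hc
          rw [newB_eq] at hc
          have := (List.mem_filter.mp hc).2
          simp only [Bool.and_eq_true, beq_iff_eq] at this
          exact this.1
        have hinv' : pvInvQ m n (zombieApplyB gB (zombieNewB m n gB)) l := by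
          constructor
          · intro c hc
            have hcN := (hmemiff c).mp hc
            have hinb := hNmem c hcN
            refine ⟨hinb, ?_⟩
            rw [hgetB c.1 c.2 hinb, if_pos hcN]
          · intro c hinb hz hadj
            rw [hgetB c.1 c.2 hinb] at hz
            by_cases hcN : (c.1, c.2) ∈ zombieNewB m n gB
            · rw [if_pos hcN] at hz; exact absurd hz (by norm_num)
            · rw [if_neg hcN] at hz
              unfold pvAdjOnes at hadj
              rw [List.any_eq_true] at hadj
              obtain ⟨d, hd, hcond⟩ := hadj
              simp only [Bool.and_eq_true, beq_iff_eq] at hcond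
              obtain ⟨hnbinb, hnbval⟩ := hcond
              rw [hgetB _ _ hnbinb] at hnbval
              by_cases hnbN : (c.1 + d.1, c.2 + d.2) ∈ zombieNewB m n gB
              · unfold pvAdjQ
                rw [List.any_eq_true]
                refine ⟨(c.1 + d.1, c.2 + d.2), (hmemiff _).mpr hnbN, ?_⟩
                rw [List.any_eq_true]
                refine ⟨(-d.1, -d.2), neg_mem_dirs d hd, ?_⟩
                simp only [Bool.and_eq_true, beq_iff_eq]
                constructor <;> [skip; skip] <;> omega
              · rw [if_neg hnbN] at hnbval
                have hadjB : pvAdjOnes m n gB c = true := by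
                  unfold pvAdjOnes
                  rw [List.any_eq_true]
                  refine ⟨d, hd, ?_⟩
                  rw [hnbval]
                  simp [hnbinb]
                have hcinN : (c.1, c.2) ∈ zombieNewB m n gB := by
                  rw [newB_eq]
                  rw [List.mem_filter]
                  refine ⟨(mem_pvCells m n (c.1, c.2)).mpr hinb, ?_⟩
                  simp only [Bool.and_eq_true, beq_iff_eq]
                  exact ⟨hz, hadjB⟩
                exact absurd hcinN hcN
        have hzero' : pvZerosW m n (zombieApplyB gB (zombieNewB m n gB)) =
            k - (zombieNewB m n gB).length := by
          have := zerosW_apply m n gB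
            (fun c => (pvGget gB c.1 c.2 == 0) && pvAdjOnes m n gB c) hsB
            (fun c hcond => by
              simp only [Bool.and_eq_true] at hcond
              exact hcond.1)
          rw [← newB_eq] at this
          omega
        rw [hNAB, ← hlenN, hNAB]
        exact ihk (k - (zombieNewB m n gB).length) (by omega)
          (zombieApplyB gA l) (zombieApplyB gB (zombieNewB m n gB)) l
          (p - ((zombieNewB m n gB).length : Int)) (day + 1) fa' fb'
          hsA' hsB' hw' hinv' hzero' (by omega) (by omega)
          (by omega) (by omega)


-- ---- top-level assembly: A's seeding scan, B's state copy, the initial invariant ----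

-- the queue entries produced by row i's scan, in order
def pvOnesOf (g : List (List Int)) (i : Int) (js : List Int) : List (Int × Int) :=
  js.filterMap (fun j =>
    if pvGget g i j == 0 then none
    else if pvGget g i j == 1 then some (i, j) else none)

theorem pvScanInner (g : List (List Int)) (i : Int) (js : List Int) :
    ∀ s : Int × List (Int × Int),
      js.foldl (fun (s : Int × List (Int × Int)) j =>
          if pvGget g i j == 0 then (s.1 + 1, s.2)
          else if pvGget g i j == 1 then (s.1, s.2 ++ [(i, j)]) else s) s =
        (s.1 + ((js.filter (fun j => pvGget g i j == 0)).length : Int),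
          s.2 ++ pvOnesOf g i js) := by
  induction js with
  | nil => intro s; simp [pvOnesOf]
  | cons a js ih =>
    intro s
    simp only [List.foldl_cons, List.filter_cons, pvOnesOf, List.filterMap_cons]
    by_cases h0 : pvGget g i a == 0
    · simp only [h0, ih]
      simp [pvOnesOf]
      omega
    · simp only [h0]
      by_cases h1 : pvGget g i a == 1
      · simp only [h1, ih]
        simp [pvOnesOf]
      · simp only [h1, ih]
        simp [pvOnesOf]

theorem pvScanOuter (g : List (List Int)) (n : Int) (is : List Int) :
    ∀ s : Int × List (Int × Int),
      is.foldl (fun (s : Int × List (Int × Int)) i =>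
          (PySem.List.pyRange 0 n 1).foldl (fun (s : Int × List (Int × Int)) j =>
              if pvGget g i j == 0 then (s.1 + 1, s.2)
              else if pvGget g i j == 1 then (s.1, s.2 ++ [(i, j)]) else s) s) s =
        (s.1 + (is.map (fun i =>
            ((((PySem.List.pyRange 0 n 1).filter (fun j => pvGget g i j == 0)).length : Int)))).sum,
          s.2 ++ is.flatMap (fun i => pvOnesOf g i (PySem.List.pyRange 0 n 1))) := by
  induction is with
  | nil => intro s; simp
  | cons a is ih =>
    intro s
    rw [List.foldl_cons, ih, pvScanInner]
    simp only [List.map_cons, List.sum_cons, List.flatMap_cons]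
    simp [Prod.ext_iff, List.append_assoc]
    ring

theorem countP_flatMap' {α β : Type} (l : List α) (f : α → List β) (p : β → Bool) :
    (l.flatMap f).countP p = (l.map (fun a => (f a).countP p)).sum := by
  induction l with
  | nil => rfl
  | cons a l ih => simp [List.flatMap_cons, List.countP_append, ih]

theorem sum_map_natCast {α : Type} (l : List α) (f : α → Nat) :
    (l.map (fun a => ((f a : Nat) : Int))).sum = (((l.map f).sum : Nat) : Int) := by
  induction l with
  | nil => rfl
  | cons a l ih => simp [ih]

theorem zerosW_flat (m n : Int) (g : List (List Int)) :
    pvZerosW m n g = ((PySem.List.pyRange 0 m 1).map (fun i =>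
      ((PySem.List.pyRange 0 n 1).filter (fun j => pvGget g i j == 0)).length)).sum := by
  unfold pvZerosW pvCells
  rw [countP_flatMap']
  congr 1
  apply List.map_congr_left
  intro i _
  rw [List.countP_map]
  rw [show ((fun c : Int × Int => pvGget g c.1 c.2 == 0) ∘ (fun j => (i, j))) =
    (fun j => pvGget g i j == 0) from rfl]
  exact List.countP_eq_length_filter

theorem rowCount (g : List (List Int)) (n i : Int) :
    ((PySem.List.pyRange 0 n 1).map (fun j => pvGget g i j)).count 0 =
      ((PySem.List.pyRange 0 n 1).filter (fun j => pvGget g i j == 0)).length := by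
  rw [List.count_eq_countP, List.countP_map, ← List.countP_eq_length_filter]
  rfl

-- B's state copy: same window values as the original grid
theorem stGet (grid : List (List Int)) (a b : Int)
    (hin : pvInb (grid.length : Int) ((grid.headD []).length : Int) a b = true) :
    pvGget ((PySem.List.pyRange 0 (grid.length : Int) 1).map (fun i =>
      (PySem.List.pyRange 0 ((grid.headD []).length : Int) 1).map
        (fun j => pvGget grid i j))) a b = pvGget grid a b := by
  simp only [pvInb, Bool.and_eq_true, decide_eq_true_eq] at hin
  have ha : a.toNat < grid.length := by omega
  have hb : b.toNat < (grid.headD []).length := by omega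
  have h1 : ((a.toNat : Int)) = a := by omega
  have h2 : ((b.toNat : Int)) = b := by omega
  have hrow : ((PySem.List.pyRange 0 (grid.length : Int) 1).map (fun i =>
      (PySem.List.pyRange 0 ((grid.headD []).length : Int) 1).map
        (fun j => pvGget grid i j))).getD a.toNat [] =
      (PySem.List.pyRange 0 ((grid.headD []).length : Int) 1).map
        (fun j => pvGget grid ((a.toNat : Int)) j) := by
    rw [List.getD_eq_getElem?_getD,
      PySem.List.getElem?_map_pyRange_zero _ grid.length a.toNat ha, Option.getD_some]
  have hcell : ((PySem.List.pyRange 0 ((grid.headD []).length : Int) 1).map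
      (fun j => pvGget grid ((a.toNat : Int)) j)).getD b.toNat 0 =
      pvGget grid ((a.toNat : Int)) ((b.toNat : Int)) := by
    rw [List.getD_eq_getElem?_getD,
      PySem.List.getElem?_map_pyRange_zero _ (grid.headD []).length b.toNat hb,
      Option.getD_some]
  show (((PySem.List.pyRange 0 (grid.length : Int) 1).map (fun i =>
      (PySem.List.pyRange 0 ((grid.headD []).length : Int) 1).map
        (fun j => pvGget grid i j))).getD a.toNat []).getD b.toNat 0 = pvGget grid a b
  rw [hrow, hcell, h1, h2]

theorem stShape (grid : List (List Int)) :
    pvShape (grid.length : Int) ((grid.headD []).length : Int)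
      ((PySem.List.pyRange 0 (grid.length : Int) 1).map (fun i =>
        (PySem.List.pyRange 0 ((grid.headD []).length : Int) 1).map
          (fun j => pvGget grid i j))) := by
  constructor
  · rw [PySem.List.pyRange_zero_natCast]
    simp
  · intro r hr
    simp only [List.mem_map] at hr
    obtain ⟨i, _, rfl⟩ := hr
    rw [PySem.List.pyRange_zero_natCast]
    simp

theorem mem_seed (grid : List (List Int)) (m n : Int) (c : Int × Int) :
    c ∈ (PySem.List.pyRange 0 m 1).flatMap
        (fun i => pvOnesOf grid i (PySem.List.pyRange 0 n 1)) ↔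
      (pvInb m n c.1 c.2 = true ∧ pvGget grid c.1 c.2 = 1) := by
  obtain ⟨a, b⟩ := c
  simp only [List.mem_flatMap, pvOnesOf, List.mem_filterMap, PySem.List.mem_pyRange_one,
    pvInb, Bool.and_eq_true, decide_eq_true_eq]
  constructor
  · rintro ⟨i, hi, j, hj, h⟩
    by_cases h0 : pvGget grid i j == 0
    · rw [if_pos h0] at h; exact absurd h (by simp)
    · rw [if_neg h0] at h
      by_cases h1 : pvGget grid i j == 1
      · rw [if_pos h1] at h
        injection h with h
        obtain ⟨rfl, rfl⟩ : i = a ∧ j = b := by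
          exact ⟨congrArg Prod.fst h, congrArg Prod.snd h⟩
        simp only [beq_iff_eq] at h1
        exact ⟨⟨⟨hi.1, hi.2⟩, hj.1, hj.2⟩, h1⟩
      · rw [if_neg h1] at h; exact absurd h (by simp)
  · rintro ⟨⟨⟨h1, h2⟩, h3, h4⟩, hv⟩
    refine ⟨a, ⟨h1, h2⟩, b, ⟨h3, h4⟩, ?_⟩
    rw [if_neg (by simp [hv]), if_pos (by simp [hv])]

theorem pvCountTake (r : List Int) : ∀ k : Nat, k ≤ r.length →
    (List.range k).countP (fun j => r.getD j 0 == 0) = (r.take k).count 0 := by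
  intro k
  induction k with
  | zero => simp
  | succ k ih =>
    intro hk
    have hk' : k < r.length := by omega
    rw [List.range_succ, List.countP_append, ih (by omega),
      List.take_add_one, List.count_append]
    simp [List.getElem?_eq_getElem hk', List.count_cons]

theorem pvSumRowsNat (f : List Int → Nat) : ∀ g : List (List Int),
    ((List.range g.length).map (fun i => f (g.getD i []))).sum = (g.map f).sum := by
  intro g
  induction g with
  | nil => simp
  | cons r g ih =>
    simp only [List.length_cons, List.range_succ_eq_map, List.map_cons, List.map_map,
      List.sum_cons, List.getD_cons_zero]
    rw [← ih]
    congr 1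

theorem zerosW_le_pvZeros (grid : List (List Int)) (hpre : Pre_zombie grid) :
    pvZerosW (grid.length : Int) ((grid.headD []).length : Int) grid ≤ pvZeros grid := by
  rw [zerosW_flat, PySem.List.pyRange_zero_natCast grid.length, List.map_map]
  have hterm : ∀ i ∈ List.range grid.length,
      ((fun i : Int =>
        ((PySem.List.pyRange 0 ((grid.headD []).length : Int) 1).filter
          (fun j => pvGget grid i j == 0)).length) ∘ (fun k : Nat => (k : Int))) i ≤
        (grid.getD i []).count 0 := by
    intro i hi
    have hi' : i < grid.length := List.mem_range.mp hi
    have hrow : grid.getD i [] = grid[i] := List.getD_eq_getElem grid [] hi'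
    have hlen : (grid.headD []).length ≤ (grid.getD i []).length := by
      rw [hrow]; exact hpre _ (List.getElem_mem hi')
    simp only [Function.comp]
    rw [← List.countP_eq_length_filter, PySem.List.pyRange_zero_natCast, List.countP_map]
    have hcong : (List.range (grid.headD []).length).countP
        ((fun j : Int => pvGget grid (i : Int) j == 0) ∘ (fun k : Nat => (k : Int))) =
        (List.range (grid.headD []).length).countP
          (fun j => (grid.getD i []).getD j 0 == 0) :=
      List.countP_congr (fun j _ => Iff.rfl)
    rw [hcong, pvCountTake _ _ hlen]
    exact ((grid.getD i []).take_sublist _).count_le 0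
  calc ((List.range grid.length).map _).sum ≤
      ((List.range grid.length).map (fun i => (grid.getD i []).count 0)).sum :=
        List.sum_le_sum hterm
    _ = (grid.map (fun r => r.count 0)).sum := pvSumRowsNat _ grid
    _ = pvZeros grid := rfl

theorem zombie_eq (grid : List (List Int)) (hpre : Pre_zombie grid) :
    zombie grid = zombie_alt grid := by
  by_cases h1 : grid = []
  · simp [zombie, zombie_alt, h1]
  by_cases h2 : grid.headD [] = []
  · unfold zombie zombie_alt
    rw [if_neg h1, if_pos h2, if_neg h1, if_pos h2]
  have hscan := pvScanOuter grid ((grid.headD []).length : Int)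
      (PySem.List.pyRange 0 (grid.length : Int) 1) ((0 : Int), ([] : List (Int × Int)))
  simp only [zero_add, List.nil_append] at hscan
  simp only [zombie, zombie_alt, if_neg h1, if_neg h2, hscan]
  have hrem : (((PySem.List.pyRange 0 (grid.length : Int) 1).map (fun i =>
        (PySem.List.pyRange 0 ((grid.headD []).length : Int) 1).map
          (fun j => pvGget grid i j))).map (fun r => ((r.count 0 : Nat) : Int))).sum =
      ((PySem.List.pyRange 0 (grid.length : Int) 1).map (fun i =>
        ((((PySem.List.pyRange 0 ((grid.headD []).length : Int) 1).filter
          (fun j => pvGget grid i j == 0)).length : Nat) : Int))).sum := by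
    rw [List.map_map]
    congr 1
    apply List.map_congr_left
    intro i _
    simp only [Function.comp]
    rw [rowCount]
  have hcount : ((PySem.List.pyRange 0 (grid.length : Int) 1).map (fun i =>
        ((((PySem.List.pyRange 0 ((grid.headD []).length : Int) 1).filter
          (fun j => pvGget grid i j == 0)).length : Nat) : Int))).sum =
      ((pvZerosW (grid.length : Int) ((grid.headD []).length : Int) grid : Nat) : Int) := by
    rw [zerosW_flat]
    exact sum_map_natCast _ _
  rw [hrem, hcount]
  by_cases hzc : ((((pvZerosW (grid.length : Int) ((grid.headD []).length : Int) grid : Nat) : Int)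
      == 0) = true)
  · rw [if_pos hzc, if_pos hzc]
  · rw [if_neg hzc, if_neg hzc]
    have hsA : pvShape (grid.length : Int) ((grid.headD []).length : Int) grid := by
      refine ⟨rfl, ?_⟩
      intro r hr
      exact_mod_cast hpre r hr
    have hsB := stShape grid
    have hw : pvWinEq (grid.length : Int) ((grid.headD []).length : Int) grid
        ((PySem.List.pyRange 0 (grid.length : Int) 1).map (fun i =>
          (PySem.List.pyRange 0 ((grid.headD []).length : Int) 1).map
            (fun j => pvGget grid i j))) :=
      fun a b hin => (stGet grid a b hin).symm
    have hinv : pvInvQ (grid.length : Int) ((grid.headD []).length : Int)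
        ((PySem.List.pyRange 0 (grid.length : Int) 1).map (fun i =>
          (PySem.List.pyRange 0 ((grid.headD []).length : Int) 1).map
            (fun j => pvGget grid i j)))
        ((PySem.List.pyRange 0 (grid.length : Int) 1).flatMap
          (fun i => pvOnesOf grid i (PySem.List.pyRange 0 ((grid.headD []).length : Int) 1))) := by
      constructor
      · intro c hc
        have hm := (mem_seed grid _ _ c).mp hc
        exact ⟨hm.1, by rw [stGet grid c.1 c.2 hm.1]; exact hm.2⟩
      · intro c hinb hz hadj
        unfold pvAdjOnes at hadj
        rw [List.any_eq_true] at hadj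
        obtain ⟨d, hd, hcond⟩ := hadj
        simp only [Bool.and_eq_true, beq_iff_eq] at hcond
        obtain ⟨hnbinb, hnbval⟩ := hcond
        rw [stGet grid _ _ hnbinb] at hnbval
        unfold pvAdjQ
        rw [List.any_eq_true]
        refine ⟨(c.1 + d.1, c.2 + d.2), (mem_seed grid _ _ _).mpr ⟨hnbinb, hnbval⟩, ?_⟩
        rw [List.any_eq_true]
        refine ⟨(-d.1, -d.2), neg_mem_dirs d hd, ?_⟩
        simp only [Bool.and_eq_true, beq_iff_eq]
        constructor <;> omega
    have hzeroSt : pvZerosW (grid.length : Int) ((grid.headD []).length : Int)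
        ((PySem.List.pyRange 0 (grid.length : Int) 1).map (fun i =>
          (PySem.List.pyRange 0 ((grid.headD []).length : Int) 1).map
            (fun j => pvGget grid i j))) =
        pvZerosW (grid.length : Int) ((grid.headD []).length : Int) grid := by
      apply List.countP_congr
      intro c hc
      rw [stGet grid c.1 c.2 ((mem_pvCells _ _ c).mp hc)]
    have hz2 : pvZeros ((PySem.List.pyRange 0 (grid.length : Int) 1).map (fun i =>
        (PySem.List.pyRange 0 ((grid.headD []).length : Int) 1).map
          (fun j => pvGget grid i j))) =
        pvZerosW (grid.length : Int) ((grid.headD []).length : Int) grid := by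
      unfold pvZeros
      rw [List.map_map, zerosW_flat]
      congr 1
      apply List.map_congr_left
      intro i _
      simp only [Function.comp]
      rw [rowCount]
    have hle := zerosW_le_pvZeros grid hpre
    have hne : pvZerosW (grid.length : Int) ((grid.headD []).length : Int) grid ≠ 0 := by
      intro h
      exact hzc (by rw [h]; simp)
    exact run_sim (grid.length : Int) ((grid.headD []).length : Int)
      (pvZerosW (grid.length : Int) ((grid.headD []).length : Int) grid)
      grid _ _ _ 0 _ _ hsA hsB hw hinv hzeroSt rfl (by omega) (by omega) (by omega)

-- ===== VERDICT (by name: the statement is the Claim_ definition above) =====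
theorem zombie_spec : Claim_equal_zombie := by
  intro grid _ hpre
  exact zombie_eq grid hpre
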